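-- pv_equiv track=rewrite | github.com/rbignon/speedfog | tools/find_redundant_overrides.py | _lookup_name
-- ===== SOURCE A (Python) =====
-- def _lookup_name(
--     name: str,
--     bosses: dict[str, str],
--     regions: dict[str, str],
--     locations: dict[str, str],
-- ) -> str | None:
--     for d in (bosses, regions, locations):
--         if name in d:
--             return d[name]
--     return None
-- ===== SOURCE B (Python) =====
-- def _lookup_name(
--     name: str,
--     bosses: dict[str, str],
--     regions: dict[str, str],
--     locations: dict[str, str],
-- ) -> str | None:
--     merged = {**locations, **regions, **bosses}
--     return merged.get(name)
-- ===== Notes on version B (the rewrite author's own statement) =====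
-- stated objective: simpler
-- what changed: Replaces the three-branch short-circuiting scan by building one merged dict (bosses entries take precedence by being merged last) followed by a single .get lookup.
import Mathlib
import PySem

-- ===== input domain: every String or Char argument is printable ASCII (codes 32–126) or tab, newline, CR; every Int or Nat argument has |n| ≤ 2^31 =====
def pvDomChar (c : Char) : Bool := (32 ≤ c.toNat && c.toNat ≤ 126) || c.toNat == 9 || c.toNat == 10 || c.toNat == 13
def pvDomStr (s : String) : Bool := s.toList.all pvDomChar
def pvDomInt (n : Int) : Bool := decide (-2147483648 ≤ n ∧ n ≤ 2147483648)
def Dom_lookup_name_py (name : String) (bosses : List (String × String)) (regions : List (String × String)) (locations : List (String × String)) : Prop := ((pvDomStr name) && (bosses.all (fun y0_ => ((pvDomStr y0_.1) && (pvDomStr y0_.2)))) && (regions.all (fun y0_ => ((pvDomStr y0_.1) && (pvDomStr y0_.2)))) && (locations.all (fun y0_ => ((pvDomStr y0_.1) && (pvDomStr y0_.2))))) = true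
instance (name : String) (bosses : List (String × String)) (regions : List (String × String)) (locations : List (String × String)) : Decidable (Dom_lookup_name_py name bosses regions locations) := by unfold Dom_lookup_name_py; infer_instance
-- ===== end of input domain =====

-- B builds one merged dict {**locations, **regions, **bosses} (bosses merged last, so
-- highest priority) and does a single .get lookup, instead of A's three-branch
-- short-circuiting scan (simpler, one staged table construction + one lookup).

-- ===== PORT A =====
-- for d in (bosses, regions, locations): if name in d: return d[name]; return None
def lookup_name_py (name : String) (bosses : List (String × String)) (regions : List (String × String)) (locations : List (String × String)) : Option String :=
  match (PySem.Dict.mk bosses).get? name with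
  | some v => some v
  | none =>
    match (PySem.Dict.mk regions).get? name with
    | some v => some v
    | none =>
      match (PySem.Dict.mk locations).get? name with
      | some v => some v
      | none => none

-- ===== PORT B =====
-- merged = {**locations, **regions, **bosses}; return merged.get(name)
-- ({**a, **b} inserts the entries of each dict in order into a fresh dict; later wins)
def lookup_name_py_alt (name : String) (bosses : List (String × String)) (regions : List (String × String)) (locations : List (String × String)) : Option String :=
  ((locations ++ regions ++ bosses).foldl
      (fun d p => d.insert p.1 p.2) PySem.Dict.empty).get? name

-- ===== PRECONDITION & SPEC =====
-- Pre_ excludes association lists carrying a duplicated key inside one dict argument: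
-- those do not represent any Python dict (Python dicts have unique keys), and on them
-- the first-match reading of A and the overwrite merge of B legitimately diverge.
def Pre_lookup_name_py (name : String) (bosses : List (String × String)) (regions : List (String × String)) (locations : List (String × String)) : Prop :=
  (bosses.map Prod.fst).Nodup ∧ (regions.map Prod.fst).Nodup ∧ (locations.map Prod.fst).Nodup
instance (name : String) (bosses : List (String × String)) (regions : List (String × String)) (locations : List (String × String)) : Decidable (Pre_lookup_name_py name bosses regions locations) := by unfold Pre_lookup_name_py; infer_instance

def pvWitness_lookup_name_py : String × (List (String × String)) × (List (String × String)) × (List (String × String)) :=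
  ("a", [("a", "boss")], [("b", "reg")], [("a", "loc"), ("c", "x")])

def Spec_lookup_name_py (name : String) (bosses : List (String × String)) (regions : List (String × String)) (locations : List (String × String)) (out : Option String) : Prop := out = lookup_name_py_alt name bosses regions locations
instance (name : String) (bosses : List (String × String)) (regions : List (String × String)) (locations : List (String × String)) (out : Option String) : Decidable (Spec_lookup_name_py name bosses regions locations out) := by unfold Spec_lookup_name_py; infer_instance

-- ===== CLAIM (what is proved, stated in full; the proofs are below) =====
def Claim_equal_lookup_name_py : Prop := ∀ (name : String) (bosses : List (String × String)) (regions : List (String × String)) (locations : List (String × String)), Dom_lookup_name_py name bosses regions locations → Pre_lookup_name_py name bosses regions locations → Spec_lookup_name_py name bosses regions locations (lookup_name_py name bosses regions locations)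

-- ===== LEMMAS AND PROOFS =====

theorem map_or_option {α β : Type} (f : α → β) (x y : Option α) :
    Option.map f (x.or y) = (Option.map f x).or (Option.map f y) := by
  cases x <;> rfl

-- First-match lookup distributes over list append.
theorem get?_mk_append (a b : List (String × String)) (k : String) :
    (PySem.Dict.mk (a ++ b)).get? k
      = ((PySem.Dict.mk a).get? k).or ((PySem.Dict.mk b).get? k) := by
  simp only [PySem.Dict.get?, List.find?_append, map_or_option]

theorem get?_mk_singleton (a b k : String) :
    (PySem.Dict.mk [(a, b)]).get? k = if k = a then some b else none := by
  rw [PySem.Dict.get?_mk_cons]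
  by_cases hk : k = a
  · subst hk; simp
  · have hne : (a == k) = false := by simp [Ne.symm hk]
    simp [hne, hk, PySem.Dict.get?]

theorem get?_mk_eq_none (l : List (String × String)) (k : String)
    (h : k ∉ l.map Prod.fst) : (PySem.Dict.mk l).get? k = none := by
  have : l.find? (fun p => p.1 == k) = none := by
    rw [List.find?_eq_none]
    intro p hp
    simp only [List.mem_map] at h
    simp only [beq_iff_eq]
    exact fun hke => h ⟨p, hp, hke⟩
  simp [PySem.Dict.get?, this]

-- With unique keys, last match = first match: reversing does not change the lookup.
theorem get?_mk_reverse (l : List (String × String)) (k : String)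
    (h : (l.map Prod.fst).Nodup) :
    (PySem.Dict.mk l.reverse).get? k = (PySem.Dict.mk l).get? k := by
  induction l with
  | nil => rfl
  | cons p t ih =>
    obtain ⟨a, b⟩ := p
    simp only [List.map_cons, List.nodup_cons] at h
    have hcons : (PySem.Dict.mk ((a, b) :: t)).get? k
        = if k = a then some b else (PySem.Dict.mk t).get? k := by
      rw [PySem.Dict.get?_mk_cons]
      by_cases hk : k = a
      · subst hk; simp
      · have hne : (a == k) = false := by simp [Ne.symm hk]
        simp [hne, hk]
    rw [List.reverse_cons, get?_mk_append, ih h.2, get?_mk_singleton, hcons]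
    by_cases hk : k = a
    · rw [get?_mk_eq_none t k (hk ▸ h.1)]
      simp [hk]
    · generalize (PySem.Dict.mk t).get? k = o
      cases o <;> simp [hk, Option.or]

-- The overwrite-merge fold looks up as "last match", i.e. first match in the reverse.
theorem get?_foldl_insert (l : List (String × String)) (d : PySem.Dict String String) (k : String) :
    (l.foldl (fun d p => d.insert p.1 p.2) d).get? k
      = ((PySem.Dict.mk l.reverse).get? k).or (d.get? k) := by
  induction l generalizing d with
  | nil => simp [PySem.Dict.get?, Option.or]
  | cons p t ih =>
    obtain ⟨a, b⟩ := p
    rw [List.foldl_cons, ih, List.reverse_cons, get?_mk_append, get?_mk_singleton,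
      PySem.Dict.get?_insert]
    generalize (PySem.Dict.mk t.reverse).get? k = o
    generalize d.get? k = o2
    by_cases hk : k = a <;> cases o <;> cases o2 <;> simp [hk, Option.or]

-- ===== VERDICT (by name: the statement is the Claim_ definition above) =====
theorem lookup_name_py_spec : Claim_equal_lookup_name_py := by
  intro name bosses regions locations _ hpre
  obtain ⟨hb, hr, hl⟩ := hpre
  unfold Spec_lookup_name_py lookup_name_py lookup_name_py_alt
  rw [get?_foldl_insert]
  have hrev : (locations ++ regions ++ bosses).reverse
      = bosses.reverse ++ (regions.reverse ++ locations.reverse) := by simp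
  rw [hrev, get?_mk_append, get?_mk_append,
    get?_mk_reverse _ _ hb, get?_mk_reverse _ _ hr, get?_mk_reverse _ _ hl,
    PySem.Dict.get?_empty]
  generalize (PySem.Dict.mk bosses).get? name = ob
  generalize (PySem.Dict.mk regions).get? name = og
  generalize (PySem.Dict.mk locations).get? name = ol
  cases ob <;> cases og <;> cases ol <;> rfl
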